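-- pv_equiv track=rewrite | github.com/tamilselvi53/HacktoberFest-2022-Python | easy/inverted_right_angle_triangle_pattern_with_number/solution.py | solution
-- ===== SOURCE A (Python) =====
-- def solution(n=-1):
--     if n==-1:
--         return -1
--     if n<1:
--         return -1
--     string= ""
--     if(n>0):
--         for row in range(n):
--             for column in range(n-row):
--                 string+=str(column+1)
--             if row==n-1:
--                 break
--             string+="\n"
--     return string
-- ===== SOURCE B (Python) =====
-- def solution(n=-1):
--     if n == -1:
--         return -1
--     if n < 1:
--         return -1
--     # Build the full first row "12...n" once, recording cumulative character
--     # offsets; every later row is a prefix slice of it.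
--     cuts = [0]
--     parts = []
--     total = 0
--     for i in range(1, n + 1):
--         s = str(i)
--         parts.append(s)
--         total += len(s)
--         cuts.append(total)
--     full = "".join(parts)
--     return "\n".join(full[:cuts[n - r]] for r in range(n))
-- ===== Notes on version B (the rewrite author's own statement) =====
-- stated objective: faster
-- what changed: B builds the full row string and a cumulative-offset table in one pass, then emits each row as a prefix slice of that string joined by newlines, instead of A's nested loops that regenerate and concatenate every number character by character per row.
-- outside the precondition, e.g. on solution(0): A returns -1, B returns -1; on solution(-1): A returns -1, B returns -1
import Mathlib
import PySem

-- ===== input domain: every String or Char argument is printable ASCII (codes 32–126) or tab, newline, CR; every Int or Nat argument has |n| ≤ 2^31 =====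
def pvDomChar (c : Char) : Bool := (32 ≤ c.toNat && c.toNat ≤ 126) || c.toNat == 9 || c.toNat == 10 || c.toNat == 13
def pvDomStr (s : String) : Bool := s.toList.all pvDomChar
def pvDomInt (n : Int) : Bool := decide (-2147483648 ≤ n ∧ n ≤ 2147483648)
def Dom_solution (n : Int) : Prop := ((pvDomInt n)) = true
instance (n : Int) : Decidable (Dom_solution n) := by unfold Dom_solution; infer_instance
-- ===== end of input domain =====

-- B builds the full row "1..n" and a cumulative-offset table in one pass and emits each row as a
-- prefix slice of it joined by newlines (measured faster than A's per-number concatenation loops).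
-- Pre_ excludes n < 1, where Python A returns the int -1 instead of a string (outside the String return type).


-- ===== PORT A =====
-- The two 'return -1' branches return an int, not a string; they are outside Pre_solution
-- and ported as "" only to keep the signature total.
def solution (n : Int) : String :=
  if n == -1 then ""
  else if n < 1 then ""
  else
    if n > 0 then
      (PySem.List.pyRange 0 n 1).foldl (fun string row =>
        let string := (PySem.List.pyRange 0 (n - row) 1).foldl
          (fun s column => s ++ PySem.Int.toStr (column + 1)) string
        if row == n - 1 then string else string ++ "\n") ""
    else ""

-- ===== PORT B =====
def solution_alt (n : Int) : String :=
  if n == -1 then ""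
  else if n < 1 then ""
  else
    let st := (PySem.List.pyRange 1 (n + 1) 1).foldl
      (fun (st : List Int × List String × Int) i =>
        let s := PySem.Int.toStr i
        (st.1 ++ [st.2.2 + PySem.Str.len s], st.2.1 ++ [s], st.2.2 + PySem.Str.len s))
      ([0], [], 0)
    let cuts := st.1
    let full := PySem.Str.join "" st.2.1
    PySem.Str.join "\n"
      ((PySem.List.pyRange 0 n 1).map (fun r =>
        PySem.Str.slice full none (some (PySem.List.pyGetD cuts (n - r) 0))))

-- ===== PRECONDITION & SPEC =====
-- Pre_ excludes n < 1, where Python A returns the int -1 (not a value of the String return type).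
def Pre_solution (n : Int) : Prop := 1 ≤ n
instance (n : Int) : Decidable (Pre_solution n) := by unfold Pre_solution; infer_instance
def pvWitness_solution : Int := (3)
def Spec_solution (n : Int) (out : String) : Prop := out = solution_alt n
instance (n : Int) (out : String) : Decidable (Spec_solution n out) := by unfold Spec_solution; infer_instance

-- ===== CLAIM (what is proved, stated in full; the proofs are below) =====
def Claim_equal_solution : Prop := ∀ (n : Int), Dom_solution n → Pre_solution n → Spec_solution n (solution n)

-- ===== LEMMAS AND PROOFS =====

-- g N = the characters of "12...N" (concatenation of str(1)..str(N))
def gRow : Nat → List Char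
  | 0 => []
  | (k+1) => gRow k ++ PySem.Int.toChars ((k : Int) + 1)

theorem gRow_prefix (m N : Nat) (h : m ≤ N) : gRow m <+: gRow N := by
  induction N with
  | zero => simpa [Nat.le_zero.mp h] using List.prefix_refl _
  | succ N ih =>
    rcases Nat.lt_or_ge m (N+1) with h' | h'
    · exact (ih (Nat.lt_succ_iff.mp h')).trans (by simp [gRow])
    · have : m = N + 1 := le_antisymm h h'
      simp [this]

theorem take_gRow (m N : Nat) (h : m ≤ N) :
    (gRow N).take (gRow m).length = gRow m :=
  (List.prefix_iff_eq_take.mp (gRow_prefix m N h)).symm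

theorem intercalate_eq_flat {α : Type} (sep : List α) :
    ∀ (xs : List (List α)) (x : List α),
      sep.intercalate (xs ++ [x]) = (xs.map (fun y => y ++ sep)).flatten ++ x := by
  intro xs
  induction xs with
  | nil => intro x; simp [List.intercalate]
  | cons y ys ih =>
    intro x
    have hcc : ∀ (a b : List α) (l : List (List α)),
        sep.intercalate (a :: b :: l) = a ++ sep ++ sep.intercalate (b :: l) := by
      intro a b l; simp [List.intercalate, List.intersperse]
    rcases hc : ys ++ [x] with _ | ⟨z, zs⟩
    · simp at hc
    · rw [show y :: ys ++ [x] = y :: z :: zs from by rw [← hc]; simp, hcc y z zs, ← hc, ih x]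
      simp

theorem intercalate_nil_flat (l : List (List Char)) : List.intercalate [] l = l.flatten := by
  induction l with
  | nil => simp [List.intercalate]
  | cons x xs ih => cases xs <;> simp_all [List.intercalate, List.intersperse]

-- A's inner loop appends the characters of "1...k"
theorem innerA (k : Nat) : ∀ (acc : String),
    ((PySem.List.pyRange 0 (k : Int) 1).foldl
      (fun s column => s ++ PySem.Int.toStr (column + 1)) acc).toList
    = acc.toList ++ gRow k := by
  induction k with
  | zero => intro acc; simp [PySem.List.pyRange_one_eq_nil (by omega : (0:Int) ≤ 0), gRow]
  | succ k ih =>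
    intro acc
    have : ((k : Nat) + 1 : Int) = (k : Int) + 1 := by push_cast; ring
    rw [show ((((k : Nat) + 1 : Nat)) : Int) = (k : Int) + 1 by push_cast; ring,
        PySem.List.pyRange_one_succ_right (by omega : (0:Int) ≤ (k : Int)),
        List.foldl_append]
    simp [ih acc, gRow, PySem.Int.toList_toStr]

-- A's outer loop, first m rows (m < N: every row is newline-terminated)
theorem outerA_aux (N : Nat) : ∀ (m : Nat), m ≤ N - 1 →
    ((PySem.List.pyRange 0 (m : Int) 1).foldl (fun string row =>
        if row == (N : Int) - 1 then
          (PySem.List.pyRange 0 ((N : Int) - row) 1).foldl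
            (fun s column => s ++ PySem.Int.toStr (column + 1)) string
        else
          ((PySem.List.pyRange 0 ((N : Int) - row) 1).foldl
            (fun s column => s ++ PySem.Int.toStr (column + 1)) string) ++ "\n") "").toList
    = ((List.range m).map (fun r => gRow (N - r) ++ ['\n'])).flatten := by
  intro m
  induction m with
  | zero => intro _; simp [PySem.List.pyRange_one_eq_nil (by omega : (0:Int) ≤ 0)]
  | succ m ih =>
    intro hm
    have hm' : m ≤ N - 1 := by omega
    have hmN : m < N - 1 ∨ N = 0 := by omega
    have hNpos : 1 ≤ N := by
      rcases Nat.eq_zero_or_pos N with h0 | h; · omega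
      · exact h
    rw [show (((m + 1 : Nat)) : Int) = (m : Int) + 1 by push_cast; ring,
        PySem.List.pyRange_one_succ_right (by omega : (0:Int) ≤ (m : Int)),
        List.foldl_append]
    have hsub : (N : Int) - (m : Int) = ((N - m : Nat) : Int) := by omega
    rw [List.foldl_cons, List.foldl_nil]
    rw [if_neg (by simp only [beq_iff_eq]; omega)]
    rw [hsub]
    rw [String.toList_append, innerA (N - m), ih hm']
    simp [List.range_succ]

theorem toList_inj' {s t : String} (h : s.toList = t.toList) : s = t :=
  String.toList_inj.mp h

-- A's full value for n = N ≥ 1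
theorem solutionA_char (N : Nat) (hN : 1 ≤ N) :
    (solution (N : Int)).toList
    = ((List.range (N - 1)).map (fun r => gRow (N - r) ++ ['\n'])).flatten ++ gRow 1 := by
  have h1 : ((N : Int) == -1) = false := by simp only [beq_eq_false_iff_ne]; omega
  have h2 : ¬ ((N : Int) < 1) := by omega
  have h3 : (N : Int) > 0 := by omega
  simp only [solution, h1, Bool.false_eq_true, if_false, h2, if_true, h3]
  have hsplit : (N : Int) = ((N - 1 : Nat) : Int) + 1 := by push_cast; omega
  rw [hsplit, PySem.List.pyRange_one_succ_right (by omega : (0:Int) ≤ ((N - 1 : Nat) : Int)),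
      List.foldl_append]
  have hrow : (((N - 1 : Nat) : Int) == ((N - 1 : Nat) : Int) + 1 - 1) = true := by
    simp only [beq_iff_eq]; ring
  simp only [List.foldl_cons, List.foldl_nil, hrow, if_true]
  have hsub : ((N - 1 : Nat) : Int) + 1 - ((N - 1 : Nat) : Int) = ((1 : Nat) : Int) := by omega
  rw [hsub]
  rw [show (((N - 1 : Nat)) : Int) + 1 = ((N : Nat) : Int) by push_cast; omega] at *
  -- reshape the step function to the if-pulled-out form used in outerA_aux
  have hfun : (fun (string : String) (row : Int) =>
        let string := (PySem.List.pyRange 0 ((N : Int) - row) 1).foldl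
          (fun s column => s ++ PySem.Int.toStr (column + 1)) string
        if row == (N : Int) - 1 then string else string ++ "\n")
      = (fun (string : String) (row : Int) =>
        if row == (N : Int) - 1 then
          (PySem.List.pyRange 0 ((N : Int) - row) 1).foldl
            (fun s column => s ++ PySem.Int.toStr (column + 1)) string
        else
          ((PySem.List.pyRange 0 ((N : Int) - row) 1).foldl
            (fun s column => s ++ PySem.Int.toStr (column + 1)) string) ++ "\n") := by
    funext string row; by_cases h : row == (N : Int) - 1 <;> simp [h]
  rw [hfun]
  rw [innerA 1]
  rw [outerA_aux N (N - 1) (le_refl _)]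

-- B's accumulation loop: cuts, parts and total after processing 1..N
theorem foldB (N : Nat) :
    ((PySem.List.pyRange 1 ((N : Int) + 1) 1).foldl
      (fun (st : List Int × List String × Int) i =>
        (st.1 ++ [st.2.2 + PySem.Str.len (PySem.Int.toStr i)],
         st.2.1 ++ [PySem.Int.toStr i],
         st.2.2 + PySem.Str.len (PySem.Int.toStr i)))
      ([0], [], 0))
    = ((List.range (N + 1)).map (fun k => ((gRow k).length : Int)),
       (List.range N).map (fun (i : Nat) => PySem.Int.toStr ((i : Int) + 1)),
       ((gRow N).length : Int)) := by
  induction N with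
  | zero => simp [PySem.List.pyRange_one_eq_nil (by omega : (1:Int) ≤ 1), gRow]
  | succ N ih =>
    rw [show (((N + 1 : Nat)) : Int) + 1 = ((N : Int) + 1) + 1 by push_cast; ring,
        PySem.List.pyRange_one_succ_right (by omega : (1:Int) ≤ (N : Int) + 1),
        List.foldl_append, ih]
    have hlen : PySem.Str.len (PySem.Int.toStr ((N : Int) + 1))
        = ((gRow (N + 1)).length : Int) - ((gRow N).length : Int) := by
      simp [PySem.Str.len, PySem.Int.toList_toStr, gRow]
    simp only [List.foldl_cons, List.foldl_nil, hlen]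
    refine Prod.ext ?_ (Prod.ext ?_ ?_) <;> simp [List.range_succ] <;> push_cast <;> ring

theorem flatten_parts (N : Nat) :
    (((List.range N).map (fun (i : Nat) => PySem.Int.toStr ((i : Int) + 1))).map String.toList).flatten
    = gRow N := by
  simp only [List.map_map]
  induction N with
  | zero => simp [gRow]
  | succ N ih => rw [List.range_succ]; simp [ih, gRow, PySem.Int.toList_toStr]

theorem cuts_getD (N k : Nat) (hk : k ≤ N) :
    ((List.range (N + 1)).map (fun k => ((gRow k).length : Int))).getD k 0
    = ((gRow k).length : Int) := by
  rw [List.getD_eq_getElem?_getD, List.getElem?_map, List.getElem?_range (by omega)]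
  rfl

-- B's full value for n = N ≥ 1
theorem solutionB_char (N : Nat) (hN : 1 ≤ N) :
    (solution_alt (N : Int)).toList
    = ((List.range (N - 1)).map (fun r => gRow (N - r) ++ ['\n'])).flatten ++ gRow 1 := by
  have h1 : ((N : Int) == -1) = false := by simp only [beq_eq_false_iff_ne]; omega
  have h2 : ¬ ((N : Int) < 1) := by omega
  simp only [solution_alt, h1, Bool.false_eq_true, if_false, h2, if_true]
  rw [foldB N]
  have hfull : (PySem.Str.join ""
      ((List.range N).map (fun (i : Nat) => PySem.Int.toStr ((i : Int) + 1)))).toList = gRow N := by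
    simp only [PySem.Str.join, PySem.Chars.join, String.toList_ofList]
    rw [show ("" : String).toList = ([] : List Char) from rfl, intercalate_nil_flat]
    exact flatten_parts N
  -- each generated row is gRow (N - r)
  have hrows : ((PySem.List.pyRange 0 (N : Int) 1).map (fun r =>
      PySem.Str.slice (PySem.Str.join ""
        ((List.range N).map (fun (i : Nat) => PySem.Int.toStr ((i : Int) + 1)))) none
        (some (PySem.List.pyGetD
          ((List.range (N + 1)).map (fun k => ((gRow k).length : Int))) ((N : Int) - r) 0)))).map
      String.toList
      = (List.range N).map (fun r => gRow (N - r)) := by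
    rw [PySem.List.pyRange_one, show ((N : Int) - 0).toNat = N by omega]
    simp only [List.map_map]
    apply List.map_congr_left
    intro r hr
    have hrN : r < N := List.mem_range.mp hr
    have hsub : (N : Int) - (0 + (r : Int)) = ((N - r : Nat) : Int) := by push_cast; omega
    simp only [Function.comp_apply, hsub, PySem.List.pyGetD_natCast]
    rw [cuts_getD N (N - r) (by omega)]
    simp only [PySem.Str.slice, PySem.Chars.slice, String.toList_ofList]
    rw [PySem.List.slice_to_natCast, hfull]
    exact take_gRow (N - r) N (by omega)
  simp only [PySem.Str.join, PySem.Chars.join, String.toList_ofList] at hrows ⊢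
  rw [hrows]
  have hsplit : (List.range N).map (fun r => gRow (N - r))
      = ((List.range (N - 1)).map (fun r => gRow (N - r))) ++ [gRow (N - (N - 1))] := by
    rw [show N = (N - 1) + 1 by omega, List.range_succ]
    simp
  rw [hsplit, show N - (N - 1) = 1 by omega]
  rw [show ("\n" : String).toList = ['\n'] from rfl]
  rw [intercalate_eq_flat ['\n'] _ (gRow 1)]
  simp only [List.map_map]; rfl

-- ===== VERDICT (by name: the statement is the Claim_ definition above) =====
theorem solution_spec : Claim_equal_solution := by
  intro n _ hpre
  unfold Spec_solution
  have hn : n = ((n.toNat : Nat) : Int) := by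
    have : (0:Int) ≤ n := by unfold Pre_solution at hpre; omega
    omega
  have hN : 1 ≤ n.toNat := by unfold Pre_solution at hpre; omega
  rw [hn]
  exact toList_inj' ((solutionA_char n.toNat hN).trans (solutionB_char n.toNat hN).symm)
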